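-- pv_equiv track=rewrite | github.com/IPostYellow/Leecode | 字节题库/1044.最长重复子串.py | search
-- ===== SOURCE A (Python) =====
-- def search(midL, a, nums):
--     h = 0
--     for i in range(midL):
--         h = (h * a + nums[i])
--     tmp_result = set()
--     tmp_result.add(h)
--     al = a ** midL
--     for i in range(1, len(nums) - midL + 1):
--         h = (h * a - nums[i - 1] * al + nums[i + midL - 1])
--         if h in tmp_result:
--             return i
--         tmp_result.add(h)
--     return -1
-- ===== SOURCE B (Python) =====
-- def search(midL, a, nums):
--     n = len(nums)
--     # prefix-hash table: P[k] = hash of nums[:k]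
--     P = [0] * (n + 1)
--     for k in range(n):
--         P[k + 1] = P[k] * a + nums[k]
--     pw = a ** midL
--     seen = {P[midL]}
--     for i in range(1, n - midL + 1):
--         h = P[i + midL] - P[i] * pw
--         if h in seen:
--             return i
--         seen.add(h)
--     return -1
-- ===== Notes on version B (the rewrite author's own statement) =====
-- stated objective: alternative
-- what changed: Replaces the single rolling-hash update pass with a precomputed prefix-hash table P plus a query pass that derives each window hash as P[i+midL]-P[i]*a**midL (equal to A's rolling value exactly as big integers); it trades A's constant-size rolling state for full-length prefix hashes, so B is slower on long inputs.
-- outside the precondition, e.g. on search(-2, -1, [3, 2, 1, 1, -1, 1]): A returns 5, B returns 3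
import Mathlib
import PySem

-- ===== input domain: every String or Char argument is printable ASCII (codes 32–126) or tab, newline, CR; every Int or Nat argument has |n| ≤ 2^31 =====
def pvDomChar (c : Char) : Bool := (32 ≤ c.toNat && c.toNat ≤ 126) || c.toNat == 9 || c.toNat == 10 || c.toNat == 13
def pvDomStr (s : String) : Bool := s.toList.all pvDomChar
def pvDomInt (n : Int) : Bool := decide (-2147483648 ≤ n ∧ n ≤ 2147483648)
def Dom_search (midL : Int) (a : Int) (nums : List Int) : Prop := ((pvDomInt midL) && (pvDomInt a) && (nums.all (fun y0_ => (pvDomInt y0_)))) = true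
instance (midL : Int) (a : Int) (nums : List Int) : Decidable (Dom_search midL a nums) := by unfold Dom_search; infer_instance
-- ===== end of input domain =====

-- B replaces the rolling-hash update pass by a prefix-hash table plus a query pass (alternative decomposition, same exact values).

-- ===== PORT A =====
-- second loop of A, with early return on a set hit
def searchGo (midL a al : Int) (nums : List Int) : List Int → Int → PySem.Set Int → Int
  | [], _, _ => -1
  | i :: rest, h, s =>
    let h' := h * a - (PySem.List.pyGetD nums (i - 1) 0) * al + (PySem.List.pyGetD nums (i + midL - 1) 0)
    if PySem.Set.contains s h' then i
    else searchGo midL a al nums rest h' (PySem.Set.add s h')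

def search (midL : Int) (a : Int) (nums : List Int) : Int :=
  let h := (PySem.List.pyRange 0 midL 1).foldl (fun h i => h * a + PySem.List.pyGetD nums i 0) 0
  let tmp := PySem.Set.add PySem.Set.empty h
  -- a ** midL: exact for midL ≥ 0 (Pre_); for midL < 0 Python produces a float, excluded by Pre_
  let al := a ^ midL.toNat
  searchGo midL a al nums (PySem.List.pyRange 1 ((nums.length : Int) - midL + 1) 1) h tmp

-- ===== PORT B =====
-- the P-building loop: P[0]=0 (seed p), P[k+1]=P[k]*a+nums[k]
def buildP (a : Int) : List Int → Int → List Int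
  | [], p => [p]
  | x :: xs, p => p :: buildP a xs (p * a + x)

-- B's query loop over window starts i
def altGo (midL pw : Int) (P : List Int) : List Int → PySem.Set Int → Int
  | [], _ => -1
  | i :: rest, seen =>
    let h := PySem.List.pyGetD P (i + midL) 0 - (PySem.List.pyGetD P i 0) * pw
    if PySem.Set.contains seen h then i
    else altGo midL pw P rest (PySem.Set.add seen h)

def search_alt (midL : Int) (a : Int) (nums : List Int) : Int :=
  let P := buildP a nums 0
  let pw := a ^ midL.toNat
  let seen := PySem.Set.add PySem.Set.empty (PySem.List.pyGetD P midL 0)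
  altGo midL pw P (PySem.List.pyRange 1 ((nums.length : Int) - midL + 1) 1) seen

-- ===== PRECONDITION & SPEC =====
-- Pre_ excludes midL > len(nums) (A raises IndexError in its first loop) and midL < 0
-- (a ** midL is a Python float, so A's hashes leave the integers and indices wrap — an
-- accidental float/wraparound path no caller of this rolling-hash helper would specify).
def Pre_search (midL : Int) (a : Int) (nums : List Int) : Prop :=
  0 ≤ midL ∧ midL ≤ (nums.length : Int)
instance (midL : Int) (a : Int) (nums : List Int) : Decidable (Pre_search midL a nums) := by unfold Pre_search; infer_instance

def pvWitness_search : Int × Int × List Int := (2, 31, [1, 2, 1, 2, 5])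

def Spec_search (midL : Int) (a : Int) (nums : List Int) (out : Int) : Prop := out = search_alt midL a nums
instance (midL : Int) (a : Int) (nums : List Int) (out : Int) : Decidable (Spec_search midL a nums out) := by unfold Spec_search; infer_instance

-- ===== CLAIM (what is proved, stated in full; the proofs are below) =====
def Claim_equal_search : Prop := ∀ (midL : Int) (a : Int) (nums : List Int), Dom_search midL a nums → Pre_search midL a nums → Spec_search midL a nums (search midL a nums)

-- ===== LEMMAS AND PROOFS =====

theorem buildP_zero (a : Int) (nums : List Int) (p : Int) :
    PySem.List.pyGetD (buildP a nums p) 0 0 = p := by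
  cases nums <;> simp [buildP, PySem.List.pyGetD_zero]

theorem buildP_succ (a : Int) (nums : List Int) (p : Int) (k : Nat) (hk : k < nums.length) :
    (buildP a nums p).getD (k + 1) 0 =
      (buildP a nums p).getD k 0 * a + nums.getD k 0 := by
  induction nums generalizing p k with
  | nil => simp at hk
  | cons x xs ih =>
    cases k with
    | zero =>
      cases xs <;> simp [buildP]
    | succ k =>
      have hk' : k < xs.length := by simpa using hk
      simpa [buildP] using ih (p * a + x) k hk'

-- Int-indexed recurrence for P = buildP a nums 0
theorem PD_succ (a : Int) (nums : List Int) (j : Int) (h0 : 0 ≤ j) (h1 : j < (nums.length : Int)) :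
    PySem.List.pyGetD (buildP a nums 0) (j + 1) 0 =
      PySem.List.pyGetD (buildP a nums 0) j 0 * a + PySem.List.pyGetD nums j 0 := by
  obtain ⟨k, rfl⟩ : ∃ k : Nat, j = (k : Int) := ⟨j.toNat, (Int.toNat_of_nonneg h0).symm⟩
  have hk : k < nums.length := by exact_mod_cast h1
  have h1' : ((k : Int) + 1) = ((k + 1 : Nat) : Int) := by push_cast; ring
  rw [h1', PySem.List.pyGetD_natCast, PySem.List.pyGetD_natCast, PySem.List.pyGetD_natCast]
  exact buildP_succ a nums 0 k hk

-- A's first loop computes P[m] for m = midL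
theorem firstLoop_eq (a : Int) (nums : List Int) (m : Nat) (hm : m ≤ nums.length) :
    (PySem.List.pyRange 0 (m : Int) 1).foldl (fun h i => h * a + PySem.List.pyGetD nums i 0) 0 =
      PySem.List.pyGetD (buildP a nums 0) (m : Int) 0 := by
  induction m with
  | zero =>
    simp [buildP_zero]
  | succ m ih =>
    have hm' : m ≤ nums.length := Nat.le_of_succ_le hm
    have hsplit : PySem.List.pyRange 0 ((m : Int) + 1) 1 =
        PySem.List.pyRange 0 (m : Int) 1 ++ [(m : Int)] :=
      PySem.List.pyRange_one_succ_right (by exact_mod_cast Nat.zero_le m)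
    have hcast : ((m + 1 : Nat) : Int) = (m : Int) + 1 := by push_cast; ring
    rw [hcast, hsplit, List.foldl_append, ih hm', PD_succ a nums m (by positivity) (by exact_mod_cast hm)]
    simp

-- window hash from the prefix table (proof-side abbreviation)
def wI (midL a : Int) (nums : List Int) (i : Int) : Int :=
  PySem.List.pyGetD (buildP a nums 0) (i + midL) 0 -
    PySem.List.pyGetD (buildP a nums 0) i 0 * a ^ midL.toNat

-- A's rolling update sends wI (i-1) to wI i
theorem roll_step (midL a : Int) (nums : List Int) (i : Int)
    (hm : 0 ≤ midL) (h1 : 1 ≤ i) (h2 : i ≤ (nums.length : Int) - midL) :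
    wI midL a nums (i - 1) * a - PySem.List.pyGetD nums (i - 1) 0 * a ^ midL.toNat +
      PySem.List.pyGetD nums (i + midL - 1) 0 = wI midL a nums i := by
  have e1 : PySem.List.pyGetD (buildP a nums 0) (i + midL) 0 =
      PySem.List.pyGetD (buildP a nums 0) (i + midL - 1) 0 * a +
        PySem.List.pyGetD nums (i + midL - 1) 0 := by
    have := PD_succ a nums (i + midL - 1) (by omega) (by omega)
    simpa [sub_add_cancel] using this
  have e2 : PySem.List.pyGetD (buildP a nums 0) i 0 =
      PySem.List.pyGetD (buildP a nums 0) (i - 1) 0 * a +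
        PySem.List.pyGetD nums (i - 1) 0 := by
    have := PD_succ a nums (i - 1) (by omega) (by omega)
    simpa [sub_add_cancel] using this
  have e3 : i - 1 + midL = i + midL - 1 := by ring
  unfold wI
  rw [e1, e2, e3]
  ring

-- the two loops agree step by step
theorem loops_eq (midL a : Int) (nums : List Int)
    (hm : 0 ≤ midL) (hn : midL ≤ (nums.length : Int)) :
    ∀ (c : Nat) (s e : Int), e - s = (c : Int) → 1 ≤ s → e ≤ (nums.length : Int) - midL + 1 →
    ∀ (st : PySem.Set Int),
      searchGo midL a (a ^ midL.toNat) nums (PySem.List.pyRange s e 1) (wI midL a nums (s - 1)) st =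
      altGo midL (a ^ midL.toNat) (buildP a nums 0) (PySem.List.pyRange s e 1) st := by
  intro c
  induction c with
  | zero =>
    intro s e hc h1 h2 st
    have : e ≤ s := by omega
    rw [PySem.List.pyRange_one_eq_nil this]
    simp [searchGo, altGo]
  | succ c ih =>
    intro s e hc h1 h2 st
    have hse : s < e := by omega
    rw [PySem.List.pyRange_one_cons hse]
    have hstep := roll_step midL a nums s hm h1 (by omega)
    simp only [searchGo, altGo]
    have hB : PySem.List.pyGetD (buildP a nums 0) (s + midL) 0 -
        PySem.List.pyGetD (buildP a nums 0) s 0 * a ^ midL.toNat = wI midL a nums s := rfl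
    rw [hstep, hB]
    have hw : wI midL a nums s = wI midL a nums (s + 1 - 1) := by norm_num
    split_ifs with hmem
    · rfl
    · rw [hw]
      exact ih (s + 1) e (by omega) (by omega) h2 _

theorem search_eq_alt (midL a : Int) (nums : List Int)
    (hm : 0 ≤ midL) (hn : midL ≤ (nums.length : Int)) :
    search midL a nums = search_alt midL a nums := by
  unfold search search_alt
  have hcast : midL = ((midL.toNat : Nat) : Int) := (Int.toNat_of_nonneg hm).symm
  have hfirst : (PySem.List.pyRange 0 midL 1).foldl
      (fun h i => h * a + PySem.List.pyGetD nums i 0) 0 =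
      PySem.List.pyGetD (buildP a nums 0) midL 0 := by
    rw [hcast]
    exact firstLoop_eq a nums midL.toNat (by omega)
  have hw0 : PySem.List.pyGetD (buildP a nums 0) midL 0 = wI midL a nums (1 - 1) := by
    unfold wI
    rw [show (1 : Int) - 1 = 0 by norm_num, buildP_zero]
    ring_nf
  simp only [hfirst]
  rw [hw0]
  exact loops_eq midL a nums hm hn ((nums.length : Int) - midL + 1 - 1).toNat 1
    ((nums.length : Int) - midL + 1) (by omega) (by omega) (by omega) _

-- ===== VERDICT (by name: the statement is the Claim_ definition above) =====
theorem search_spec : Claim_equal_search := by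
  intro midL a nums _ hpre
  unfold Spec_search
  exact search_eq_alt midL a nums hpre.1 hpre.2
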